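-- pv_equiv track=rewrite | github.com/BOKJUNSOO/coding-test-study-lgcns | ksy/BOJ/7주차/continuenum2-1.py | calc
-- ===== SOURCE A (Python) =====
-- def calc(n):
--     length = 0
--     digit = 1
--     start = 1
--     while start <= n:
--         end = min(n, start * 10 - 1)
--         length += (end - start + 1) * digit
--         start *= 10
--         digit += 1
--     return length
-- ===== SOURCE B (Python) =====
-- def calc(n):
--     if n <= 0:
--         return 0
--     d = len(str(n))
--     return (n + 1) * d - (10 ** d - 1) // 9
-- ===== Notes on version B (the rewrite author's own statement) =====
-- stated objective: simpler
-- what changed: Replaced the per-digit-length block loop by a single closed-form expression computed from the digit count of n.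
import Mathlib
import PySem

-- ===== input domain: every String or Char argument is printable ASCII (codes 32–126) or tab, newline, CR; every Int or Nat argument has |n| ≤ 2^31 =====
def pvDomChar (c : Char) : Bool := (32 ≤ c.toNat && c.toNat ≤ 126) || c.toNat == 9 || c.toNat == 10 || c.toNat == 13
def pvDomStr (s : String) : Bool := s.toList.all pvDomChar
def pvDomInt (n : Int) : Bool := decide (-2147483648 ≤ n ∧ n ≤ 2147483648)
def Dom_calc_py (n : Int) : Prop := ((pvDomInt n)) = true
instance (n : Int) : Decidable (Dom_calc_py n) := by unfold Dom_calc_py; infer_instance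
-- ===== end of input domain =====

-- B replaces A's per-digit-length block loop by a closed-form expression in the digit count of n (simpler: no loop).

-- ===== PORT A =====
-- literal port of A's while loop; the proof argument `h : 1 ≤ start` only justifies
-- termination (in A, start is always a positive power of 10) and carries no data
def calcAux (n length digit start : Int) (h : 1 ≤ start) : Int :=
  if hc : start ≤ n then
    calcAux n (length + (min n (start * 10 - 1) - start + 1) * digit) (digit + 1) (start * 10)
      (by omega)
  else length
termination_by (n + 1 - start).toNat
decreasing_by omega

def calc_py (n : Int) : Int := calcAux n 0 1 1 (by omega)

-- ===== PORT B =====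
-- port of Source B; `10 ** d` is ported as `10 ^ d.toNat` (exact here: d = len(str(n)) ≥ 0)
def calc_py_alt (n : Int) : Int :=
  if n ≤ 0 then 0
  else
    let d := PySem.Str.len (PySem.Int.toStr n)
    (n + 1) * d - PySem.Int.floordiv (10 ^ d.toNat - 1) 9

-- ===== PRECONDITION & SPEC =====
def Spec_calc_py (n : Int) (out : Int) : Prop := out = calc_py_alt n
instance (n : Int) (out : Int) : Decidable (Spec_calc_py n out) := by unfold Spec_calc_py; infer_instance

-- ===== CLAIM (what is proved, stated in full; the proofs are below) =====
def Claim_equal_calc_py : Prop := ∀ (n : Int), Dom_calc_py n → Spec_calc_py n (calc_py n)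

-- ===== LEMMAS AND PROOFS =====

-- the repunit 0, 1, 11, 111, … = (10^m - 1)/9
def pvRep : Nat → Int
  | 0 => 0
  | m + 1 => 10 * pvRep m + 1

theorem pvRep_nine (m : Nat) : 9 * pvRep m = 10 ^ m - 1 := by
  induction m with
  | zero => simp [pvRep]
  | succ m ih => rw [pvRep]; push_cast [pow_succ]; linarith

-- exact length of Nat.toDigits in base 10 on positive input
theorem toDigitsCore_length_eq :
    ∀ (f n : Nat), 0 < n → n < 10 ^ f → (Nat.toDigitsCore 10 f n []).length = Nat.log 10 n + 1 := by
  intro f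
  induction f with
  | zero => intro n h1 h2; omega
  | succ f ih =>
    intro n h1 h2
    simp only [Nat.toDigitsCore]
    by_cases h10 : n / 10 = 0
    · have hn : n < 10 := by omega
      simp [h10, Nat.log_eq_zero_iff, hn]
    · rw [if_neg h10, Nat.toDigitsCore_lens_eq]
      have hpos : 0 < n / 10 := Nat.pos_of_ne_zero h10
      have hlt : n / 10 < 10 ^ f := by
        rw [Nat.div_lt_iff_lt_mul (by norm_num)]
        calc n < 10 ^ (f + 1) := h2
          _ = 10 ^ f * 10 := by ring
      have h10le : 10 ≤ n := by omega
      have hlog : 0 < Nat.log 10 n := Nat.log_pos (by norm_num) h10le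
      rw [ih (n / 10) hpos hlt, Nat.log_div_base]
      omega

theorem toChars_length (n : Int) (h : 1 ≤ n) :
    (PySem.Int.toChars n).length = Nat.log 10 n.toNat + 1 := by
  unfold PySem.Int.toChars
  rw [if_neg (by omega)]
  show (Nat.toDigitsCore 10 (n.toNat + 1) n.toNat []).length = _
  apply toDigitsCore_length_eq _ _ (by omega)
  calc n.toNat < 10 ^ n.toNat := Nat.lt_pow_self (by norm_num)
    _ ≤ 10 ^ (n.toNat + 1) := Nat.pow_le_pow_right (by norm_num) (by omega)

-- the value args determine the result (the termination proof is irrelevant)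
theorem calcAux_congr (n L L' D D' S S' : Int) (h : 1 ≤ S) (h' : 1 ≤ S')
    (hL : L = L') (hD : D = D') (hS : S = S') :
    calcAux n L D S h = calcAux n L' D' S' h' := by subst hL; subst hD; subst hS; rfl

-- closed form for A's loop from block start = 10^d onward
theorem calcAux_closed :
    ∀ (k d : Nat) (L n : Int) (h : 1 ≤ (10:Int) ^ d), (10:Int) ^ d ≤ n → n < 10 ^ (d + k) →
      calcAux n L ((d : Int) + 1) ((10:Int) ^ d) h =
        L + (n + 1) * ((Nat.log 10 n.toNat : Int) + 1) - pvRep (Nat.log 10 n.toNat + 1)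
          - 10 ^ d * d + pvRep d := by
  intro k
  induction k with
  | zero =>
    intro d L n h hge hlt
    rw [Nat.add_zero] at hlt
    omega
  | succ k ih =>
    intro d L n h hge hlt
    rw [calcAux, dif_pos hge]
    have h9 : 9 * pvRep d = 10 ^ d - 1 := pvRep_nine d
    have hS : (10:Int) ^ d * 10 = 10 ^ (d + 1) := by ring
    by_cases hn : n < 10 ^ (d + 1)
    · -- last block: the next call returns its accumulator
      rw [calcAux_congr n _ _ _ (((d:Int) + 1) + 1) _ ((10:Int) ^ (d+1)) _
            (one_le_pow₀ (by norm_num)) rfl rfl hS]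
      rw [calcAux, dif_neg (by omega)]
      have hlog : Nat.log 10 n.toNat = d := by
        apply Nat.log_eq_of_pow_le_of_lt_pow
        · have : ((10 ^ d : Nat) : Int) ≤ (n.toNat : Int) := by
            push_cast
            rw [Int.toNat_of_nonneg (by omega)]
            exact hge
          exact_mod_cast this
        · have : (n.toNat : Int) < ((10 ^ (d + 1) : Nat) : Int) := by
            push_cast
            rw [Int.toNat_of_nonneg (by omega)]
            exact hn
          exact_mod_cast this
      rw [hlog]
      have hmin : min n ((10:Int) ^ d * 10 - 1) = n := by
        rw [min_eq_left]; omega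
      rw [hmin, pvRep]
      linear_combination h9
    · -- full block, recurse on the next power of 10
      rw [not_lt] at hn
      rw [calcAux_congr n _ _ _ ((((d+1 : Nat)) : Int) + 1) _ ((10:Int) ^ (d+1)) _
            (one_le_pow₀ (by norm_num)) rfl (by push_cast; ring) hS]
      rw [ih (d + 1) _ n _ hn (by rw [show d + 1 + k = d + (k + 1) from by omega]; exact hlt)]
      have hmin : min n ((10:Int) ^ d * 10 - 1) = 10 ^ d * 10 - 1 := by
        rw [min_eq_right]; omega
      rw [hmin]
      have h9' : 9 * pvRep (d + 1) = 10 ^ (d + 1) - 1 := pvRep_nine (d + 1)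
      push_cast [pow_succ]
      push_cast [pow_succ] at h9'
      linarith [h9, h9']

theorem fdiv_rep (m : Nat) : PySem.Int.floordiv (10 ^ m - 1) 9 = pvRep m := by
  unfold PySem.Int.floordiv
  rw [← pvRep_nine m, Int.mul_fdiv_cancel_left _ (by norm_num)]

-- ===== VERDICT (by name: the statement is the Claim_ definition above) =====
theorem calc_py_spec : Claim_equal_calc_py := by
  intro n hdom
  unfold Spec_calc_py calc_py calc_py_alt
  have hbound : -2147483648 ≤ n ∧ n ≤ 2147483648 := by
    simpa [Dom_calc_py, pvDomInt] using hdom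
  by_cases hn : n ≤ 0
  · rw [calcAux, dif_neg (by omega), if_pos hn]
  · rw [if_neg hn]
    have h1 : (1:Int) ≤ n := by omega
    have hd : PySem.Str.len (PySem.Int.toStr n) = (Nat.log 10 n.toNat : Int) + 1 := by
      rw [PySem.Str.len_eq, PySem.Int.toList_toStr, toChars_length n h1]
      push_cast
      ring
    have hcalc := calcAux_closed 10 0 0 n (by norm_num) (by norm_num; omega)
      (by norm_num; omega)
    norm_num at hcalc
    rw [hcalc]
    simp only [hd]
    have htn : ((Nat.log 10 n.toNat : Int) + 1).toNat = Nat.log 10 n.toNat + 1 := by omega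
    rw [htn, fdiv_rep, pvRep]
    simp [pvRep]
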